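-- pv_equiv track=rewrite | github.com/maliks1/vulnerable-flask-app | main.py | parse_statements
-- ===== SOURCE A (Python) =====
-- def parse_statements(raw_sql):
--     """
--     Split a raw SQL string into individual statements on ';',
--     while correctly handling single-quoted string literals
--     (including SQL-escaped '' quotes inside strings).
--
--     Example:
--         "SELECT * FROM users; DROP TABLE users"
--         → ["SELECT * FROM users", "DROP TABLE users"]
--
--         "SELECT * FROM users WHERE name='O''Brien'; SELECT 1"
--         → ["SELECT * FROM users WHERE name='O''Brien'", "SELECT 1"]
--     """
--     statements = []
--     buf = []
--     in_str = False
--     i = 0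
--
--     while i < len(raw_sql):
--         ch = raw_sql[i]
--
--         if in_str:
--             buf.append(ch)
--             if ch == "'":
--                 # escaped quote '' → stay inside the string
--                 if i + 1 < len(raw_sql) and raw_sql[i + 1] == "'":
--                     buf.append("'")
--                     i += 1
--                 else:
--                     in_str = False
--         elif ch == "'":
--             in_str = True
--             buf.append(ch)
--         elif ch == ";":
--             stmt = "".join(buf).strip()
--             if stmt:
--                 statements.append(stmt)
--             buf = []
--         else:
--             buf.append(ch)
--
--         i += 1
--
--     # Trailing statement without a semicolon
--     tail = "".join(buf).strip()
--     if tail: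
--         statements.append(tail)
--
--     return statements
-- ===== SOURCE B (Python) =====
-- def _skip_literal(s, i):
--     # i points at an opening quote; return the index just past the literal
--     # (past the closing quote, with '' treated as an escaped quote), or len(s)
--     # if the literal is unterminated.
--     j = i + 1
--     n = len(s)
--     while j < n:
--         if s[j] == "'":
--             if j + 1 < n and s[j + 1] == "'":
--                 j += 2
--             else:
--                 return j + 1
--         else:
--             j += 1
--     return n
--
--
-- def parse_statements(raw_sql):
--     statements = []
--     buf = []
--     i = 0
--     n = len(raw_sql)
--     while i < n:
--         ch = raw_sql[i]
--         if ch == ";":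
--             stmt = "".join(buf).strip()
--             if stmt:
--                 statements.append(stmt)
--             buf = []
--             i += 1
--         elif ch == "'":
--             j = _skip_literal(raw_sql, i)
--             buf.append(raw_sql[i:j])
--             i = j
--         else:
--             buf.append(ch)
--             i += 1
--     tail = "".join(buf).strip()
--     if tail:
--         statements.append(tail)
--     return statements
-- ===== Notes on version B (the rewrite author's own statement) =====
-- stated objective: alternative
-- what changed: Replaces the per-character in_str flag state machine with a tokenizing scan that consumes each quoted literal wholesale via a _skip_literal helper and appends it as one slice.
import Mathlib
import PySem

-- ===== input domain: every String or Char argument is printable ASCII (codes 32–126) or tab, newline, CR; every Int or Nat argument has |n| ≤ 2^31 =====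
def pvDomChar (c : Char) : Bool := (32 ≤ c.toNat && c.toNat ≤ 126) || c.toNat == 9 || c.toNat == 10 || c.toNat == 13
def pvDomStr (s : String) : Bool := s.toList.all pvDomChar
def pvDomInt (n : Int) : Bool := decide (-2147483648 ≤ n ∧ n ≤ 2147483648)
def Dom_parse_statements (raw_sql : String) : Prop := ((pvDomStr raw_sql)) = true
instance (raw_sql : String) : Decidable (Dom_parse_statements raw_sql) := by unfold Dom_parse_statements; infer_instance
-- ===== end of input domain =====

-- B replaces A's per-character in_str flag machine by a tokenizer that consumes quoted literals wholesale (alternative decomposition, same cost).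


-- ===== PORT A =====
-- char-by-char loop with an in_str flag; the i+1 lookahead for an escaped '' becomes pattern matching on the tail
def parseA : List Char → Bool → List Char → List String → List String
  | [], _, buf, stmts =>
      let tail := PySem.Chars.strip buf
      if tail ≠ [] then stmts ++ [String.mk tail] else stmts
  | c :: rest, in_str, buf, stmts =>
      if in_str then
        if c = '\'' then
          -- Python's i+1 lookahead: inspect the next character, if any
          match rest with
          | [] => parseA [] false (buf ++ [c]) stmts
          | d :: rest' =>
              if d = '\'' then parseA rest' true (buf ++ [c, '\'']) stmts
              else parseA (d :: rest') false (buf ++ [c]) stmts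
        else parseA rest true (buf ++ [c]) stmts
      else if c = '\'' then parseA rest true (buf ++ [c]) stmts
      else if c = ';' then
        let stmt := PySem.Chars.strip buf
        parseA rest false [] (if stmt ≠ [] then stmts ++ [String.mk stmt] else stmts)
      else parseA rest false (buf ++ [c]) stmts
  termination_by l _ _ _ => l.length
  decreasing_by all_goals simp

def parse_statements (raw_sql : String) : List String :=
  parseA raw_sql.toList false [] []

-- ===== PORT B =====
-- _skip_literal: called on the characters after the opening quote, returns (literal body incl. closing quote, rest)
def skipLitB : List Char → List Char × List Char
  | [] => ([], [])
  | '\'' :: '\'' :: rest' => let p := skipLitB rest'; ('\'' :: '\'' :: p.1, p.2)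
  | '\'' :: rest => (['\''], rest)
  | c :: rest => let p := skipLitB rest; (c :: p.1, p.2)

theorem skipLitB_len : ∀ l : List Char, (skipLitB l).2.length ≤ l.length := by
  intro l
  induction l using skipLitB.induct with
  | case1 => simp [skipLitB]
  | case2 rest' ih => simp [skipLitB]; omega
  | case3 rest h =>
      cases rest with
      | nil => simp [skipLitB]
      | cons d r => simp [skipLitB]
  | case4 c rest h hq ih => simp [skipLitB]; omega

def parseB : List Char → List Char → List String → List String
  | [], buf, stmts =>
      let tail := PySem.Chars.strip buf
      if tail ≠ [] then stmts ++ [String.mk tail] else stmts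
  | c :: rest, buf, stmts =>
      if c = ';' then
        let stmt := PySem.Chars.strip buf
        parseB rest [] (if stmt ≠ [] then stmts ++ [String.mk stmt] else stmts)
      else if c = '\'' then
        let p := skipLitB rest
        parseB p.2 (buf ++ c :: p.1) stmts
      else parseB rest (buf ++ [c]) stmts
  termination_by l => l.length
  decreasing_by all_goals (simp; try exact skipLitB_len rest)

def parse_statements_alt (raw_sql : String) : List String :=
  parseB raw_sql.toList [] []

-- ===== PRECONDITION & SPEC =====
def Spec_parse_statements (raw_sql : String) (out : List String) : Prop := out = parse_statements_alt raw_sql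
instance (raw_sql : String) (out : List String) : Decidable (Spec_parse_statements raw_sql out) := by unfold Spec_parse_statements; infer_instance

-- ===== CLAIM (what is proved, stated in full; the proofs are below) =====
def Claim_equal_parse_statements : Prop := ∀ (raw_sql : String), Dom_parse_statements raw_sql → Spec_parse_statements raw_sql (parse_statements raw_sql)

-- ===== LEMMAS AND PROOFS =====

-- inside a string literal, A's flagged loop consumes exactly what skipLitB consumes
theorem parseA_inStr : ∀ (l buf : List Char) (stmts : List String),
    parseA l true buf stmts = parseA (skipLitB l).2 false (buf ++ (skipLitB l).1) stmts := by
  intro l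
  induction l using skipLitB.induct with
  | case1 => intro buf stmts; simp [skipLitB, parseA]
  | case2 rest' ih =>
      intro buf stmts
      rw [parseA.eq_def]
      simp only [skipLitB, ih]
      simp
  | case3 rest h =>
      intro buf stmts
      cases rest with
      | nil => simp [skipLitB, parseA]
      | cons d r =>
          have hd : d ≠ '\'' := fun hdq => h r (by rw [hdq])
          rw [parseA.eq_def, skipLitB.eq_def]
          simp [hd]
  | case4 c rest h hq ih =>
      intro buf stmts
      have hc : c ≠ '\'' := fun h' => hq h'
      rw [parseA.eq_def, skipLitB.eq_def]
      cases rest with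
      | nil => simp [hc, ih]
      | cons d r => simp [hc, ih]

theorem parseA_eq_parseB : ∀ (n : Nat) (l buf : List Char) (stmts : List String),
    l.length ≤ n → parseA l false buf stmts = parseB l buf stmts := by
  intro n
  induction n with
  | zero =>
      intro l buf stmts h
      have : l = [] := by cases l <;> simp_all
      subst this; simp [parseA, parseB]
  | succ n ih =>
      intro l buf stmts h
      cases l with
      | nil => simp [parseA, parseB]
      | cons c rest =>
          simp only [List.length_cons] at h
          have hlen := skipLitB_len rest
          by_cases hq : c = '\''
          · subst hq
            rw [parseA.eq_def, parseB.eq_def]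
            simp only [if_pos rfl, if_neg (by decide : ¬ ('\'' : Char) = ';'), reduceIte]
            rw [parseA_inStr]
            simp only [List.append_assoc, List.singleton_append]
            exact ih _ _ _ (by omega)
          · by_cases hs : c = ';'
            · subst hs
              rw [parseA.eq_def, parseB.eq_def]
              simp only [if_neg hq, if_pos rfl, reduceIte, Bool.false_eq_true, if_false,
                if_neg (by decide : ¬ (';' : Char) = '\'')]
              exact ih _ _ _ (by omega)
            · rw [parseA.eq_def, parseB.eq_def]
              simp only [if_neg hq, if_neg hs, reduceIte, Bool.false_eq_true, if_false]
              exact ih _ _ _ (by omega)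

-- ===== VERDICT (by name: the statement is the Claim_ definition above) =====
theorem parse_statements_spec : Claim_equal_parse_statements := by
  intro raw_sql _
  unfold Spec_parse_statements parse_statements parse_statements_alt
  exact parseA_eq_parseB raw_sql.toList.length _ _ _ le_rfl
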